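-- pv_equiv track=rewrite | github.com/grimmweeper/aoc-2023 | day7/day7-2.py | accountForJoker
-- ===== SOURCE A (Python) =====
-- def accountForJoker(cardFrequency):
--     frequencyArray = list(cardFrequency.values())
--     maxFrequency = max(frequencyArray)
--
--     if 'J' in cardFrequency:
--
--
--         # {'J': 1, 'Q': 2, 'A': 2} => {'Q': 3, 'A': 2}
--         # Joker is not the max: Add to max frequency letter
--         if maxFrequency != cardFrequency['J']:
--             card = [k for k, v in cardFrequency.items() if v == maxFrequency]
--             cardFrequency[card[0]] += cardFrequency['J']
--             del cardFrequency['J']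
--
--         # {'J': 3, 'Q': 1, 'A': 1} => {'Q': 4, 'A': 1}
--         # Joker is the max: Add to the next highest max frequency letter
--         elif cardFrequency['J'] < 5:
--             frequencyArray.remove(maxFrequency)
--             newMaxFrequency = max(frequencyArray)
--             card = [k for k, v in cardFrequency.items() if v == newMaxFrequency]
--             if 'J' in card:
--                 card.remove('J')
--             cardFrequency[card[0]] += cardFrequency['J']
--             del cardFrequency['J']
--
--     return cardFrequency
-- ===== SOURCE B (Python) =====
-- def accountForJoker(cardFrequency):
--     # Sort-then-rebuild: rank the non-joker cards by count with a stable sort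
--     # (ties keep insertion order), credit the jokers to the top card while
--     # rebuilding the dict in one comprehension.  Unlike A, B does not mutate
--     # its argument; the returned mapping is the same.
--     maxFrequency = max(cardFrequency.values())
--     j = cardFrequency.get('J')
--     if j is None or (j == maxFrequency and j >= 5):
--         return cardFrequency
--     best = sorted((k for k in cardFrequency if k != 'J'),
--                   key=lambda k: -cardFrequency[k])[0]
--     return {k: v + (j if k == best else 0)
--             for k, v in cardFrequency.items() if k != 'J'}
-- ===== Notes on version B (the rewrite author's own statement) =====
-- stated objective: alternative
-- what changed: A's two branches (joker-is-max with values.remove and a second max pass, vs joker-not-max with a key-list filter) are replaced by sort-then-rebuild: a stable sort ranks the non-joker keys by descending count so its first element is the receiving card (ties keep insertion order), and a filtered dict comprehension rebuilds the result instead of A's in-place += / del; Pre_ excludes only the inputs where A raises ValueError (empty dict, or 'J' the sole key with count < 5 -- B raises there too) and duplicate-key lists no dict can produce.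
-- outside the precondition, e.g. on accountForJoker({'J': 2}): A raises ValueError, B raises IndexError
import Mathlib
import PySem

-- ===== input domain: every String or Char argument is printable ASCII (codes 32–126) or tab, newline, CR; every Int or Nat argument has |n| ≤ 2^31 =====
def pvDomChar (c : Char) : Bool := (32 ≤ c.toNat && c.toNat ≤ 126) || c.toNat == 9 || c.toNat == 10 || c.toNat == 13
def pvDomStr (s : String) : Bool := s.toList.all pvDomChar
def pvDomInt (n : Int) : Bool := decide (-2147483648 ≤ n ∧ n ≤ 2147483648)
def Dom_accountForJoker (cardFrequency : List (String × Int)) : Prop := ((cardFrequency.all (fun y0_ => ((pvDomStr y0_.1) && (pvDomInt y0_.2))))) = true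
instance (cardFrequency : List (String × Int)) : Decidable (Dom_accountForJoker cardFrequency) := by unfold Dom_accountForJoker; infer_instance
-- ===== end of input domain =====

-- B replaces A's two joker branches by sort-then-rebuild: a stable sort ranks the non-joker keys by
-- descending count and a filtered comprehension rebuilds the dict (B does not mutate its argument,
-- unlike A; the theorems are about the returned mapping).


-- ===== PORT A =====
def accountForJoker (cardFrequency : List (String × Int)) : List (String × Int) :=
  let d := PySem.Dict.mk cardFrequency
  let frequencyArray := d.values
  match PySem.List.max? frequencyArray (fun v => v) with
  | none => cardFrequency            -- max([]) raises ValueError: excluded by Pre_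
  | some maxFrequency =>
    if d.contains "J" then
      let jv := d.getD "J" 0
      if maxFrequency ≠ jv then
        -- card = [k for k, v in cardFrequency.items() if v == maxFrequency]
        let card := (d.items.filter (fun kv => kv.2 = maxFrequency)).map (fun kv => kv.1)
        match card with
        | [] => cardFrequency        -- unreachable (maxFrequency is attained)
        | c :: _ => ((d.modify c 0 (· + jv)).erase "J").items
      else if jv < 5 then
        match PySem.List.remove? frequencyArray maxFrequency with
        | none => cardFrequency      -- unreachable (maxFrequency ∈ frequencyArray)
        | some rest =>
          match PySem.List.max? rest (fun v => v) with
          | none => cardFrequency    -- max([]) raises ValueError: excluded by Pre_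
          | some newMaxFrequency =>
            let card0 := (d.items.filter (fun kv => kv.2 = newMaxFrequency)).map (fun kv => kv.1)
            let card := if "J" ∈ card0 then card0.erase "J" else card0
            match card with
            | [] => cardFrequency    -- unreachable
            | c :: _ => ((d.modify c 0 (· + jv)).erase "J").items
      else cardFrequency
    else cardFrequency

-- ===== PORT B =====
def accountForJoker_alt (cardFrequency : List (String × Int)) : List (String × Int) :=
  let d := PySem.Dict.mk cardFrequency
  match PySem.List.max? d.values (fun v => v) with
  | none => cardFrequency            -- max([]) raises ValueError: excluded by Pre_
  | some maxFrequency =>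
    match d.get? "J" with
    | none => cardFrequency
    | some j =>
      if j = maxFrequency ∧ 5 ≤ j then cardFrequency
      else
        -- best = sorted((k for k in cardFrequency if k != 'J'), key=lambda k: -cardFrequency[k])[0]
        match PySem.List.sorted (d.keys.filter (fun k => k ≠ "J")) (fun k => -(d.getD k 0)) with
        | [] => cardFrequency        -- [0] on an empty list raises IndexError: excluded by Pre_
        | best :: _ =>
          -- {k: v + (j if k == best else 0) for k, v in cardFrequency.items() if k != 'J'}
          (d.items.filter (fun kv => kv.1 ≠ "J")).map
            (fun kv => (kv.1, kv.2 + (if kv.1 = best then j else 0)))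

-- ===== PRECONDITION & SPEC =====
-- Pre_ excludes (a) inputs where both Pythons raise (empty dict; 'J' the only key with count < 5)
-- and (b) association lists with duplicate keys, which no Python dict can produce.
def Pre_accountForJoker (cardFrequency : List (String × Int)) : Prop :=
  cardFrequency ≠ [] ∧ (cardFrequency.map Prod.fst).Nodup ∧
    ¬ (cardFrequency.length = 1 ∧ ∀ p ∈ cardFrequency, p.1 = "J" ∧ p.2 < 5)
instance (cardFrequency : List (String × Int)) : Decidable (Pre_accountForJoker cardFrequency) := by
  unfold Pre_accountForJoker; infer_instance

def pvWitness_accountForJoker : (List (String × Int)) := [("J", 1), ("Q", 2), ("A", 2)]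

def Spec_accountForJoker (cardFrequency : List (String × Int)) (out : List (String × Int)) : Prop := out = accountForJoker_alt cardFrequency
instance (cardFrequency : List (String × Int)) (out : List (String × Int)) : Decidable (Spec_accountForJoker cardFrequency out) := by unfold Spec_accountForJoker; infer_instance

-- ===== CLAIM (what is proved, stated in full; the proofs are below) =====
def Claim_equal_accountForJoker : Prop := ∀ (cardFrequency : List (String × Int)), Dom_accountForJoker cardFrequency → Pre_accountForJoker cardFrequency → Spec_accountForJoker cardFrequency (accountForJoker cardFrequency)

-- ===== LEMMAS AND PROOFS =====

-- the fold step of PySem.List.max? (Python's max: strict '>' replaces, so ties keep the FIRST)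
def pvStep {α : Type} (key : α → Int) : Option α → α → Option α := fun acc x =>
  match acc with
  | none => some x
  | some m => if key m < key x then some x else some m

-- the running best over t starting from b
def pvBest {α : Type} (key : α → Int) (b : α) (t : List α) : α :=
  t.foldl (fun b x => if key b < key x then x else b) b

theorem pvMax?_eq {α : Type} (key : α → Int) (xs : List α) :
    PySem.List.max? xs key = xs.foldl (pvStep key) none := rfl

theorem pvFoldl_step_some {α : Type} (key : α → Int) (t : List α) (b : α) :
    t.foldl (pvStep key) (some b) = some (pvBest key b t) := by
  induction t generalizing b with
  | nil => rfl
  | cons y t ih =>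
      simp only [List.foldl_cons, pvStep, pvBest]
      split_ifs with h <;> simp [ih, pvBest]

theorem pvBest_le {α : Type} (key : α → Int) (t : List α) (b : α) :
    key b ≤ key (pvBest key b t) := by
  induction t generalizing b with
  | nil => exact le_refl _
  | cons y t ih =>
      simp only [pvBest, List.foldl_cons]
      split_ifs with h
      · exact le_of_lt (lt_of_lt_of_le h (ih y))
      · exact ih b

theorem pvBest_cases {α : Type} (key : α → Int) (t : List α) (b : α) :
    pvBest key b t = b ∨ key b < key (pvBest key b t) := by
  induction t generalizing b with
  | nil => exact Or.inl rfl
  | cons y t ih =>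
      simp only [pvBest, List.foldl_cons]
      split_ifs with h
      · exact Or.inr (lt_of_lt_of_le h (pvBest_le key t y))
      · exact ih b

theorem pvFind?_best {α : Type} (key : α → Int) (t : List α) (b : α)
    (h : key b < key (pvBest key b t)) :
    t.find? (fun z => decide (key z = key (pvBest key b t))) = some (pvBest key b t) := by
  induction t generalizing b with
  | nil => simp [pvBest] at h
  | cons y t ih =>
      have hstep : pvBest key b (y :: t) = pvBest key (if key b < key y then y else b) t := by
        simp only [pvBest, List.foldl_cons]
      by_cases hby : key b < key y
      · rw [hstep]; simp only [if_pos hby]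
        rcases pvBest_cases key t y with hc | hc
        · rw [hc]; simp
        · rw [List.find?_cons_of_neg (by simp; omega), ih y hc]
      · rw [hstep] at h ⊢; simp only [if_neg hby] at h ⊢
        have hyb : key y ≤ key b := le_of_not_gt hby
        rw [List.find?_cons_of_neg (by simp; omega), ih b h]

-- Python's max returns the FIRST element attaining the maximum of the key
theorem pvFind?_argmax {α : Type} (key : α → Int) (xs : List α) (m : α)
    (h : PySem.List.max? xs key = some m) :
    xs.find? (fun z => decide (key z = key m)) = some m := by
  cases xs with
  | nil => simp [PySem.List.max?] at h
  | cons x t =>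
      rw [pvMax?_eq] at h
      simp only [List.foldl_cons] at h
      have h' : t.foldl (pvStep key) (some x) = some m := h
      rw [pvFoldl_step_some] at h'
      have hm : pvBest key x t = m := by injection h'
      subst hm
      by_cases hx : key x = key (pvBest key x t)
      · rcases pvBest_cases key t x with hc | hc
        · rw [List.find?_cons_of_pos (by simp [hx])]
          rw [hc]
        · omega
      · rcases pvBest_cases key t x with hc | hc
        · rw [hc] at hx; exact absurd rfl hx
        · rw [List.find?_cons_of_neg (by simp [hx])]
          exact pvFind?_best key t x hc

theorem pvMax?_map {α β : Type} (key : β → Int) (f : α → β) (l : List α) :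
    PySem.List.max? (l.map f) key = (PySem.List.max? l (fun x => key (f x))).map f := by
  rw [pvMax?_eq, pvMax?_eq]
  have aux : ∀ (l : List α) (acc : Option α),
      (l.map f).foldl (pvStep key) (acc.map f) = (l.foldl (pvStep (fun x => key (f x))) acc).map f := by
    intro l
    induction l with
    | nil => intro acc; rfl
    | cons x t ih =>
        intro acc
        simp only [List.map_cons, List.foldl_cons]
        have : pvStep key (acc.map f) (f x) = (pvStep (fun x => key (f x)) acc x).map f := by
          cases acc with
          | none => rfl
          | some b => simp only [pvStep, Option.map_some]; split_ifs <;> rfl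
        rw [this, ih]
  exact aux l none

theorem pvMax?_congr {α : Type} (k1 k2 : α → Int) (l : List α)
    (h : ∀ x ∈ l, k1 x = k2 x) :
    PySem.List.max? l k1 = PySem.List.max? l k2 := by
  rw [pvMax?_eq, pvMax?_eq]
  have aux : ∀ (l : List α) (acc : Option α), (∀ x ∈ l, k1 x = k2 x) →
      (∀ b, acc = some b → k1 b = k2 b) →
      l.foldl (pvStep k1) acc = l.foldl (pvStep k2) acc := by
    intro l
    induction l with
    | nil => intro acc _ _; rfl
    | cons x t ih =>
        intro acc hl hacc
        simp only [List.foldl_cons]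
        have hx : k1 x = k2 x := hl x (List.mem_cons_self ..)
        have hstep : pvStep k1 acc x = pvStep k2 acc x := by
          cases acc with
          | none => rfl
          | some b => simp only [pvStep, hacc b rfl, hx]
        rw [hstep]
        refine ih _ (fun y hy => hl y (List.mem_cons_of_mem _ hy)) ?_
        intro b hb
        cases acc with
        | none => simp only [pvStep] at hb; cases hb; exact hx
        | some c =>
            simp only [pvStep] at hb
            split_ifs at hb <;> cases hb
            · exact hx
            · exact hacc _ rfl
  exact aux l none (by exact h) (by intro b hb; cases hb)

-- head of one insertion of B's stable insertion sort = Python-max step with the negated key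
theorem pvHead_insertBy {α : Type} (key : α → Int) (x : α) (l : List α) :
    (PySem.List.insertBy (fun a b => decide (key a < key b)) x l).head? =
      pvStep (fun a => -key a) l.head? x := by
  cases l with
  | nil => rfl
  | cons y ys =>
      simp only [PySem.List.insertBy, pvStep, List.head?_cons, decide_eq_true_eq]
      split_ifs with h1 h2 <;> first | rfl | (exfalso; omega)

theorem pvFoldl_head {α : Type} (key : α → Int) (xs : List α) (acc : List α) :
    (xs.foldl (fun acc x => PySem.List.insertBy (fun a b => decide (key a < key b)) x acc) acc).head?
      = xs.foldl (pvStep (fun a => -key a)) acc.head? := by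
  induction xs generalizing acc with
  | nil => rfl
  | cons x t ih =>
      simp only [List.foldl_cons]
      rw [ih, pvHead_insertBy]

-- the head of B's stable sort is the FIRST element maximizing the negated key (Python's max)
theorem pvHead_sorted {α : Type} (xs : List α) (key : α → Int) :
    (PySem.List.sorted xs key false).head? = PySem.List.max? xs (fun a => -key a) := by
  rw [pvMax?_eq]
  show (xs.foldl (fun acc x => PySem.List.insertBy (fun a b => decide (key a < key b)) x acc) []).head?
      = xs.foldl (pvStep (fun a => -key a)) none
  rw [pvFoldl_head]
  rfl

-- B's comprehension rebuild = A's modify-then-erase, for a non-"J" key present with a unique binding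
theorem pvMapFilter (l : List (String × Int)) (best : String) (v0 j : Int)
    (hbJ : ¬ best = "J")
    (hv : ∀ p ∈ l, p.1 = best → p.2 = v0) :
    (l.map (fun p => if p.1 == best then (best, v0 + j) else p)).filter (fun p => !(p.1 == "J"))
      = (l.filter (fun kv => decide ¬kv.1 = "J")).map
          (fun kv => (kv.1, kv.2 + (if kv.1 = best then j else 0))) := by
  induction l with
  | nil => rfl
  | cons p t ih =>
      have ht := fun q hq => hv q (List.mem_cons_of_mem _ hq)
      have hp := hv p (List.mem_cons_self ..)
      have ih' := ih ht
      simp only [List.map_cons, List.filter_cons]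
      by_cases hb : p.1 = best
      · have hv2 : p.2 = v0 := hp hb
        have hnJ : ¬ p.1 = "J" := by rw [hb]; exact hbJ
        have h1 : (p.1 == best) = true := by simp [hb]
        have h2 : (best == "J") = false := by simp [hbJ]
        have h3 : decide (¬ p.1 = "J") = true := by simp [hnJ]
        simp only [h1, if_true, h2, Bool.not_false, h3]
        rw [ih']
        simp [hb, hv2]
      · have h1 : (p.1 == best) = false := by simp [hb]
        simp only [h1, Bool.false_eq_true, if_false]
        by_cases hJ : p.1 = "J"
        · have h2 : (p.1 == "J") = true := by simp [hJ]
          have h3 : decide (¬ p.1 = "J") = false := by simp [hJ]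
          simp only [h2, Bool.not_true, h3, Bool.false_eq_true, if_false]
          exact ih'
        · have h2 : (p.1 == "J") = false := by simp [hJ]
          have h3 : decide (¬ p.1 = "J") = true := by simp [hJ]
          simp only [h2, Bool.not_false, h3]
          rw [ih']
          simp [hb]

theorem pvShape (cf : List (String × Int)) (best : String) (j : Int)
    (hnd : (cf.map Prod.fst).Nodup) (hmem : best ∈ cf.map Prod.fst) (hbJ : ¬ best = "J") :
    (((PySem.Dict.mk cf).modify best 0 (· + j)).erase "J").items
      = (cf.filter (fun kv => decide ¬kv.1 = "J")).map
          (fun kv => (kv.1, kv.2 + (if kv.1 = best then j else 0))) := by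
  have hndk : (PySem.Dict.mk cf).keys.Nodup := hnd
  have hcon : (PySem.Dict.mk cf).contains best = true := by
    obtain ⟨p, hp, hp1⟩ := List.mem_map.mp hmem
    exact List.any_eq_true.mpr ⟨p, hp, by simp [hp1]⟩
  have hv : ∀ p ∈ cf, p.1 = best → p.2 = (PySem.Dict.mk cf).getD best 0 := by
    intro p hp hpb
    have h' : (PySem.Dict.mk cf).get? p.1 = some p.2 :=
      PySem.Dict.get?_of_mem_items (PySem.Dict.mk cf) (by simpa using hp) hndk
    rw [hpb] at h'
    rw [PySem.Dict.getD_eq_get?_getD, h']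
    rfl
  show ((PySem.Dict.mk cf).insert best ((PySem.Dict.mk cf).getD best 0 + j)).items.filter
      (fun p => !(p.1 == "J")) = _
  rw [PySem.Dict.insert, if_pos hcon]
  exact pvMapFilter cf best ((PySem.Dict.mk cf).getD best 0) j hbJ hv

theorem pvTwo_le_length {α : Type} {l : List α} {a b : α}
    (ha : a ∈ l) (hb : b ∈ l) (hne : a ≠ b) : 2 ≤ l.length := by
  match l with
  | [] => cases ha
  | [x] => simp at ha hb; cases hne (ha.trans hb.symm)
  | x :: y :: t => simp

theorem pvFilter_comm {α : Type} (p q : α → Bool) (l : List α) :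
    (l.filter p).filter q = (l.filter q).filter p := by
  simp [List.filter_filter, Bool.and_comm]

theorem pvExists_ne_of_two {l : List (String × Int)} (hnd : (l.map (fun x => x.1)).Nodup)
    (h2 : 2 ≤ l.length) : ∃ p ∈ l, ¬ p.1 = "J" := by
  match l with
  | [] => simp at h2
  | [p] => simp at h2
  | p :: q :: t =>
      have hpq : p.1 ≠ q.1 := by
        simp only [List.map_cons, List.nodup_cons, List.mem_cons] at hnd
        exact fun h => hnd.1 (Or.inl h)
      by_cases hp : p.1 = "J"
      · exact ⟨q, List.mem_cons_of_mem _ (List.mem_cons_self ..), fun h => hpq (hp.trans h.symm)⟩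
      · exact ⟨p, List.mem_cons_self .., hp⟩

theorem accountForJoker_main : ∀ (cf : List (String × Int)), Pre_accountForJoker cf →
    accountForJoker cf = accountForJoker_alt cf := by
  intro cf hpre
  obtain ⟨hne, hnd, hno⟩ := hpre
  have hndk : (PySem.Dict.mk cf).keys.Nodup := hnd
  have hvals : (PySem.Dict.mk cf).values = cf.map (fun x => x.2) := rfl
  rcases hmx : PySem.List.max? (PySem.Dict.mk cf).values (fun v => v) with _ | mx
  · exact absurd (by simpa [hvals] using (PySem.List.max?_eq_none_iff _ _).mp hmx) hne
  rcases hj : (PySem.Dict.mk cf).get? "J" with _ | j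
  · -- no 'J': both sides return cf unchanged
    have hcon : (PySem.Dict.mk cf).contains "J" = false := by
      rw [PySem.Dict.contains_eq_isSome_get?, hj]; rfl
    simp only [accountForJoker, accountForJoker_alt, hmx, hj, hcon, Bool.false_eq_true,
      if_false]
  have hcon : (PySem.Dict.mk cf).contains "J" = true := by
    rw [PySem.Dict.contains_eq_isSome_get?, hj]; rfl
  have hjv : (PySem.Dict.mk cf).getD "J" 0 = j := by
    rw [PySem.Dict.getD_eq_get?_getD, hj]; rfl
  have hpJ : ("J", j) ∈ cf := by
    have h' := hj
    simp only [PySem.Dict.get?, Option.map_eq_some_iff] at h'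
    obtain ⟨q, hq, hq2⟩ := h'
    have hq1 : q.1 = "J" := by simpa using List.find?_some hq
    have hqm : q ∈ cf := List.mem_of_find?_eq_some hq
    obtain ⟨k, v⟩ := q
    simp only at hq1 hq2
    rwa [← hq1, ← hq2]
  have hJuniq : ∀ p ∈ cf, p.1 = "J" → p.2 = j := by
    intro p hp hpj
    have h' : (PySem.Dict.mk cf).get? p.1 = some p.2 :=
      PySem.Dict.get?_of_mem_items (PySem.Dict.mk cf) (by simpa using hp) hndk
    rw [hpj, hj] at h'
    exact (Option.some.injEq _ _).mp h'.symm
  have hmemvals : ∀ p ∈ cf, p.2 ∈ (PySem.Dict.mk cf).values := by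
    intro p hp; rw [hvals]; exact List.mem_map_of_mem hp
  have hmax : ∀ p ∈ cf, p.2 ≤ mx := fun p hp =>
    PySem.List.max?_isMax hmx _ (hmemvals p hp)
  have hjle : j ≤ mx := hmax _ hpJ
  by_cases hcond : j = mx ∧ 5 ≤ j
  · -- all-joker stop case: both return cf
    obtain ⟨hjm, hj5⟩ := hcond
    simp only [accountForJoker, accountForJoker_alt, hmx, hj, hcon, if_true, hjv]
    rw [if_neg (by omega), if_neg (by omega), if_pos ⟨hjm, hj5⟩]
  · -- merge case
    have hNJne : cf.filter (fun p => decide ¬p.1 = "J") ≠ [] := by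
      intro hemp
      have hall : ∀ p ∈ cf, p.1 = "J" := by
        intro p hp
        by_contra hne'
        have hmem : p ∈ cf.filter (fun p => decide ¬p.1 = "J") :=
          List.mem_filter.mpr ⟨hp, by simpa using hne'⟩
        rw [hemp] at hmem
        simp at hmem
      have hmxj : mx = j := by
        have hm := PySem.List.max?_mem hmx
        rw [hvals] at hm
        obtain ⟨q, hq, hq2⟩ := List.mem_map.mp hm
        rw [← hq2]
        exact hJuniq q hq (hall q hq)
      have hlen : cf.length = 1 := by
        cases cf with
        | nil => exact absurd rfl hne
        | cons p t =>
            cases t with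
            | nil => rfl
            | cons q t' =>
                have hp1 := hall p (List.mem_cons_self ..)
                have hq1 := hall q (List.mem_cons_of_mem _ (List.mem_cons_self ..))
                simp only [List.map_cons, List.nodup_cons, List.mem_cons] at hnd
                exact absurd (Or.inl (hp1.trans hq1.symm)) hnd.1
      exact hno ⟨hlen, fun p hp => ⟨hall p hp, by rw [hJuniq p hp (hall p hp)]; omega⟩⟩
    rcases hbp : PySem.List.max? (cf.filter (fun p => decide ¬p.1 = "J")) (fun p => p.2)
      with _ | bp
    · exact absurd ((PySem.List.max?_eq_none_iff _ _).mp hbp) hNJne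
    have hbpNJ := PySem.List.max?_mem hbp
    rw [List.mem_filter] at hbpNJ
    obtain ⟨hbpcf, hbpJ'⟩ := hbpNJ
    have hbpJ : ¬ bp.1 = "J" := by simpa using hbpJ'
    have hbpmax : ∀ p ∈ cf, ¬ p.1 = "J" → p.2 ≤ bp.2 := by
      intro p hp hpj
      exact PySem.List.max?_isMax hbp _ (List.mem_filter.mpr ⟨hp, by simpa using hpj⟩)
    have hbple : bp.2 ≤ mx := hmax _ hbpcf
    have hgetD : ∀ p ∈ cf.filter (fun p => decide ¬p.1 = "J"),
        (PySem.Dict.mk cf).getD p.1 0 = p.2 := by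
      intro p hp
      have hp' := (List.mem_filter.mp hp).1
      rw [PySem.Dict.getD_eq_get?_getD,
        PySem.Dict.get?_of_mem_items (PySem.Dict.mk cf) (by simpa using hp') hndk]
      rfl
    have hkeys : ((PySem.Dict.mk cf).keys.filter (fun k => decide ¬k = "J")) =
        (cf.filter (fun p => decide ¬p.1 = "J")).map (fun x => x.1) := by
      show (List.filter _ (cf.map (fun x => x.1))) = _
      rw [List.filter_map]
      rfl
    -- B's result
    have hB : accountForJoker_alt cf =
        (((PySem.Dict.mk cf).modify bp.1 0 (· + j)).erase "J").items := by
      simp only [accountForJoker_alt, hmx, hj]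
      rw [if_neg hcond]
      have hhead : (PySem.List.sorted ((PySem.Dict.mk cf).keys.filter (fun k => decide ¬k = "J"))
          (fun k => -((PySem.Dict.mk cf).getD k 0)) false).head? = some bp.1 := by
        rw [pvHead_sorted]
        rw [pvMax?_congr _ (fun k => (PySem.Dict.mk cf).getD k 0) _ (by intro x _; simp)]
        rw [hkeys, pvMax?_map, pvMax?_congr _ (fun p => p.2) _ hgetD, hbp]
        rfl
      rcases hs : PySem.List.sorted ((PySem.Dict.mk cf).keys.filter (fun k => decide ¬k = "J"))
          (fun k => -((PySem.Dict.mk cf).getD k 0)) false with _ | ⟨best, rest⟩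
      · rw [hs] at hhead; simp at hhead
      · rw [hs] at hhead
        simp only [List.head?_cons, Option.some.injEq] at hhead
        subst hhead
        exact (pvShape cf bp.1 j hnd (List.mem_map_of_mem hbpcf) hbpJ).symm
    rw [hB]
    -- shared facts for the A side
    have hfind : List.find? (fun z => decide (z.2 = bp.2))
        (cf.filter (fun p => decide ¬p.1 = "J")) = some bp :=
      pvFind?_argmax (fun p => p.2) _ bp hbp
    have hselhead : ∀ tgt : Int, tgt = bp.2 →
        (((cf.filter (fun p => decide ¬p.1 = "J")).filter
            (fun kv => decide (kv.2 = tgt))).map (fun x => x.1)).head? = some bp.1 := by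
      intro tgt htgt
      subst htgt
      rw [List.head?_map, List.head?_filter, hfind]
      rfl
    have hnd' : ∀ (pr : String × Int → Bool),
        ((cf.filter pr).map (fun x => x.1)).Nodup := by
      intro pr
      have hs : ((cf.filter pr).map (fun x => x.1)).Sublist (cf.map (fun x => x.1)) :=
        List.Sublist.map _ List.filter_sublist
      exact hs.nodup hnd
    have hvcount : List.count mx ((PySem.Dict.mk cf).values) =
        (cf.filter (fun p => p.2 == mx)).length := by
      rw [hvals, List.count_eq_countP, List.countP_map, List.countP_eq_length_filter]
      rfl
    have hmxval : mx ∈ (PySem.Dict.mk cf).values := PySem.List.max?_mem hmx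
    by_cases hb1 : mx = j
    · -- A's 'joker is the max' branch: remove one copy of mx from the values and max again
      have hj5 : j < 5 := by
        rcases lt_or_ge j 5 with h | h
        · exact h
        · exact absurd ⟨hb1.symm, h⟩ hcond
      simp only [accountForJoker, hmx, hcon, hjv, if_true]
      rw [if_neg (by omega), if_pos (by omega),
        PySem.List.remove?_eq_some_erase _ mx hmxval]
      rcases hnm : PySem.List.max? ((PySem.Dict.mk cf).values.erase mx) (fun v => v)
        with _ | nm
      · -- the inner max([]) would raise: excluded by Pre_
        exfalso
        have hemp := (PySem.List.max?_eq_none_iff _ _).mp hnm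
        have hl := List.length_erase_of_mem hmxval
        rw [hemp] at hl
        have hlv : (PySem.Dict.mk cf).values.length = cf.length := by
          rw [hvals, List.length_map]
        have hvne : 0 < (PySem.Dict.mk cf).values.length :=
          List.length_pos_of_mem hmxval
        have hlen1 : cf.length = 1 := by simp at hl; omega
        obtain ⟨a, ha⟩ := List.length_eq_one_iff.mp hlen1
        rw [ha] at hpJ
        have ha' : a = ("J", j) := by
          simp only [List.mem_singleton] at hpJ
          exact hpJ.symm
        exact hno ⟨hlen1, by
          intro p hp
          rw [ha, ha'] at hp
          have hp' : p = ("J", j) := by simpa using hp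
          exact ⟨by rw [hp'], by rw [hp']; omega⟩⟩
      · have hnmmem := PySem.List.max?_mem hnm
        have hnmbp : nm = bp.2 := by
          have hle1 : nm ≤ bp.2 := by
            by_cases hnmmx : nm = mx
            · have h1 : 0 < List.count mx ((PySem.Dict.mk cf).values.erase mx) :=
                List.count_pos_iff.mpr (hnmmx ▸ hnmmem)
              have h2 : 2 ≤ List.count mx ((PySem.Dict.mk cf).values) := by
                have := List.count_erase_self (a := mx) (l := (PySem.Dict.mk cf).values)
                omega
              rw [hvcount] at h2
              obtain ⟨p, hpF, hpJ'⟩ := pvExists_ne_of_two (hnd' _) h2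
              obtain ⟨hpcf, hpv⟩ := List.mem_filter.mp hpF
              have hpv' : p.2 = mx := by simpa using hpv
              have := hbpmax p hpcf hpJ'
              omega
            · have hnmv : nm ∈ (PySem.Dict.mk cf).values := List.mem_of_mem_erase hnmmem
              rw [hvals] at hnmv
              obtain ⟨p, hp, hp2⟩ := List.mem_map.mp hnmv
              have hpnJ : ¬ p.1 = "J" := by
                intro hpj
                have := hJuniq p hp hpj
                omega
              have := hbpmax p hp hpnJ
              omega
          have hle2 : bp.2 ≤ nm := by
            by_cases hbpmx : bp.2 = mx
            · have hJF : ("J", j) ∈ cf.filter (fun p => p.2 == mx) :=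
                List.mem_filter.mpr ⟨hpJ, by simp [hb1]⟩
              have hbpF : bp ∈ cf.filter (fun p => p.2 == mx) :=
                List.mem_filter.mpr ⟨hbpcf, by simp [hbpmx]⟩
              have hne2 : bp ≠ ("J", j) := fun h => hbpJ (by rw [h])
              have h2 := pvTwo_le_length hbpF hJF hne2
              rw [← hvcount] at h2
              have h3 : 0 < List.count mx ((PySem.Dict.mk cf).values.erase mx) := by
                rw [List.count_erase_self]; omega
              have hmem := List.count_pos_iff.mp h3
              have := PySem.List.max?_isMax hnm mx hmem
              omega
            · have hmem : bp.2 ∈ (PySem.Dict.mk cf).values.erase mx :=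
                (List.mem_erase_of_ne hbpmx).mpr (hmemvals bp hbpcf)
              exact PySem.List.max?_isMax hnm _ hmem
          omega
        -- the selected card is bp.1
        have hcard : (if "J" ∈ (cf.filter (fun kv => decide (kv.2 = nm))).map (fun x => x.1)
              then ((cf.filter (fun kv => decide (kv.2 = nm))).map (fun x => x.1)).erase "J"
              else (cf.filter (fun kv => decide (kv.2 = nm))).map (fun x => x.1)) =
            ((cf.filter (fun p => decide ¬p.1 = "J")).filter
              (fun kv => decide (kv.2 = nm))).map (fun x => x.1) := by
          have hstep1 : (if "J" ∈ (cf.filter (fun kv => decide (kv.2 = nm))).map (fun x => x.1)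
                then ((cf.filter (fun kv => decide (kv.2 = nm))).map (fun x => x.1)).erase "J"
                else (cf.filter (fun kv => decide (kv.2 = nm))).map (fun x => x.1)) =
              ((cf.filter (fun kv => decide (kv.2 = nm))).map (fun x => x.1)).filter
                (fun k => k != "J") := by
            split_ifs with hmem
            · exact (hnd' _).erase_eq_filter "J"
            · refine (List.filter_eq_self.mpr ?_).symm
              intro a ha
              simp only [bne_iff_ne, ne_eq]
              intro h
              exact hmem (h ▸ ha)
          rw [hstep1, List.filter_map, pvFilter_comm]
          have hpr : List.filter ((fun k => k != "J") ∘ fun x => x.1) cf =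
              List.filter (fun p => decide ¬p.1 = "J") cf :=
            List.filter_congr (by intro x _; by_cases h : x.1 = "J" <;> simp [h, Function.comp])
          rw [hpr]
        simp only [hnm]
        rw [hcard]
        rcases hc : ((cf.filter (fun p => decide ¬p.1 = "J")).filter
            (fun kv => decide (kv.2 = nm))).map (fun x => x.1) with _ | ⟨c, rest⟩
        · exfalso
          have := hselhead nm hnmbp
          rw [hc] at this
          simp at this
        · have hhead := hselhead nm hnmbp
          rw [hc] at hhead
          simp only [List.head?_cons, Option.some.injEq] at hhead
          rw [hc, hhead]
    · -- A's 'joker is not the max' branch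
      have hmxbp : mx = bp.2 := by
        have h1 : mx ≤ bp.2 := by
          have hm := hmxval
          rw [hvals] at hm
          obtain ⟨p, hp, hp2⟩ := List.mem_map.mp hm
          have hpnJ : ¬ p.1 = "J" := by
            intro hpj
            have := hJuniq p hp hpj
            omega
          have := hbpmax p hp hpnJ
          omega
        omega
      simp only [accountForJoker, hmx, hcon, hjv, if_true]
      rw [if_pos (by omega)]
      have hfiltermx : cf.filter (fun kv => decide (kv.2 = mx)) =
          (cf.filter (fun p => decide ¬p.1 = "J")).filter (fun kv => decide (kv.2 = mx)) := by
        rw [pvFilter_comm]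
        refine (List.filter_eq_self.mpr ?_).symm
        intro a ha
        obtain ⟨hacf, hav⟩ := List.mem_filter.mp ha
        have hav' : a.2 = mx := by simpa using hav
        simp only [decide_eq_true_eq]
        intro haj
        have := hJuniq a hacf haj
        omega
      rw [hfiltermx]
      rcases hc : ((cf.filter (fun p => decide ¬p.1 = "J")).filter
          (fun kv => decide (kv.2 = mx))).map (fun x => x.1) with _ | ⟨c, rest⟩
      · exfalso
        have := hselhead mx hmxbp
        rw [hc] at this
        simp at this
      · have hhead := hselhead mx hmxbp
        rw [hc] at hhead
        simp only [List.head?_cons, Option.some.injEq] at hhead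
        rw [hc, hhead]

-- ===== VERDICT (by name: the statement is the Claim_ definition above) =====
theorem accountForJoker_spec : Claim_equal_accountForJoker := by
  intro cf _ hpre
  unfold Spec_accountForJoker
  exact accountForJoker_main cf hpre
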